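-- pv_equiv track=rewrite | github.com/AnthonyC-S/project-euler | project_euler_037.py | generateNums
-- ===== SOURCE A (Python) =====
-- middle_digs = [1,3,7,9]
--
-- last_dig = [3,7]
--
-- def generateNums(num_middle_digits, candidate_list):
--   if num_middle_digits == 0:
--     final_candidate_list = []
--     for c in candidate_list:
--       for d in last_dig:
--         final_candidate_list.append(c*10 + d)
--     return final_candidate_list
--
--   else:
--     new_candidate_list = []
--     for c in candidate_list:
--       for m in middle_digs:
--         new_candidate_list.append(c*10 + m)
--     num_middle_digits -= 1
--     return generateNums(num_middle_digits, new_candidate_list)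
-- ===== SOURCE B (Python) =====
-- middle_digs = [1,3,7,9]
--
-- last_dig = [3,7]
--
-- def generateNums(num_middle_digits, candidate_list):
--   result = candidate_list
--   while num_middle_digits != 0:
--     result = [c*10 + m for c in result for m in middle_digs]
--     num_middle_digits -= 1
--   return [c*10 + d for c in result for d in last_dig]
-- ===== Notes on version B (the rewrite author's own statement) =====
-- stated objective: simpler
-- what changed: Replaces A's recursion with append-loops by an iterative while loop over flat list comprehensions.
import Mathlib
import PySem

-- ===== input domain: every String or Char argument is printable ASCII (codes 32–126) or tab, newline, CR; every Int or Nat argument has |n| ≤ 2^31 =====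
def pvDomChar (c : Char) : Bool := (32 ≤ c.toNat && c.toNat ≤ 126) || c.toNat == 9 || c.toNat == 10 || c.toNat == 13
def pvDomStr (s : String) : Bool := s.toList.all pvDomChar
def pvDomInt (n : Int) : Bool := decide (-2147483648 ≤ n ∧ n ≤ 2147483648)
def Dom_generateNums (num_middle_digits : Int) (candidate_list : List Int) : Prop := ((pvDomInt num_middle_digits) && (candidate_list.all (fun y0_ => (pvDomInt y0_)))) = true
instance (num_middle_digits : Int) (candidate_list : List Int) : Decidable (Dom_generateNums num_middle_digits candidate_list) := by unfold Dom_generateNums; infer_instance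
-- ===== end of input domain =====

-- B replaces A's recursion with append-loops by an iterative loop over flat list comprehensions (simpler; same cost).
-- ===== PORT A =====
-- A's recursion decrements until 0; a fuel counter (= num_middle_digits.toNat, exact for the
-- admitted num_middle_digits >= 0) makes it total; Pre_ excludes negative counts, where A raises RecursionError.
def generateNumsFuel : Nat → Int → List Int → List Int
  | fuel, num_middle_digits, candidate_list =>
    if num_middle_digits == 0 then
      candidate_list.foldl (fun acc c => [3, 7].foldl (fun acc2 d => acc2 ++ [c * 10 + d]) acc) []
    else
      match fuel with
      | 0 => []  -- unreachable under Pre_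
      | fuel + 1 =>
        generateNumsFuel fuel (num_middle_digits - 1)
          (candidate_list.foldl (fun acc c => [1, 3, 7, 9].foldl (fun acc2 m => acc2 ++ [c * 10 + m]) acc) [])

def generateNums (num_middle_digits : Int) (candidate_list : List Int) : List Int :=
  generateNumsFuel num_middle_digits.toNat num_middle_digits candidate_list

-- ===== PORT B =====
-- the while loop runs num_middle_digits times (exact for the admitted num_middle_digits >= 0)
def generateNumsIter : Nat → List Int → List Int
  | 0, result => result
  | n + 1, result => generateNumsIter n (result.flatMap (fun c => [1, 3, 7, 9].map (fun m => c * 10 + m)))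

def generateNums_alt (num_middle_digits : Int) (candidate_list : List Int) : List Int :=
  (generateNumsIter num_middle_digits.toNat candidate_list).flatMap (fun c => [3, 7].map (fun d => c * 10 + d))

-- ===== PRECONDITION & SPEC =====
-- Pre_ excludes negative counts, on which A's unbounded recursion raises RecursionError (B loops forever).
def Pre_generateNums (num_middle_digits : Int) (candidate_list : List Int) : Prop :=
  0 ≤ num_middle_digits
instance (num_middle_digits : Int) (candidate_list : List Int) : Decidable (Pre_generateNums num_middle_digits candidate_list) := by
  unfold Pre_generateNums; infer_instance
def pvWitness_generateNums : Int × List Int := (1, [2, 5])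
def Spec_generateNums (num_middle_digits : Int) (candidate_list : List Int) (out : List Int) : Prop := out = generateNums_alt num_middle_digits candidate_list
instance (num_middle_digits : Int) (candidate_list : List Int) (out : List Int) : Decidable (Spec_generateNums num_middle_digits candidate_list out) := by unfold Spec_generateNums; infer_instance

-- ===== CLAIM (what is proved, stated in full; the proofs are below) =====
def Claim_equal_generateNums : Prop := ∀ (num_middle_digits : Int) (candidate_list : List Int), Dom_generateNums num_middle_digits candidate_list → Pre_generateNums num_middle_digits candidate_list → Spec_generateNums num_middle_digits candidate_list (generateNums num_middle_digits candidate_list)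

-- ===== LEMMAS AND PROOFS =====

-- ===== VERDICT (by name: the statement is the Claim_ definition above) =====
lemma inner_loop_eq (x : Int) (digs : List Int) : ∀ (a : List Int),
    digs.foldl (fun acc2 d => acc2 ++ [x * 10 + d]) a = a ++ digs.map (fun d => x * 10 + d) := by
  induction digs with
  | nil => simp
  | cons d ds ihd => intro a; simp [ihd]

lemma expand_loop_eq (xs : List Int) (digs : List Int) :
    xs.foldl (fun acc c => digs.foldl (fun acc2 d => acc2 ++ [c * 10 + d]) acc) [] =
      xs.flatMap (fun c => digs.map (fun d => c * 10 + d)) := by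
  have h : ∀ (acc : List Int),
      xs.foldl (fun acc c => digs.foldl (fun acc2 d => acc2 ++ [c * 10 + d]) acc) acc =
        acc ++ xs.flatMap (fun c => digs.map (fun d => c * 10 + d)) := by
    induction xs with
    | nil => simp
    | cons x xs ih =>
      intro acc
      simp only [List.foldl_cons, List.flatMap_cons, inner_loop_eq]
      simp [← List.flatMap_def]
  simpa using h []

lemma fuel_eq_iter (fuel : Nat) (n : Int) (cl : List Int) (h : n = (fuel : Int)) :
    generateNumsFuel fuel n cl =
      (generateNumsIter fuel cl).flatMap (fun c => [3, 7].map (fun d => c * 10 + d)) := by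
  induction fuel generalizing n cl with
  | zero => subst h; simp [generateNumsFuel, generateNumsIter, ← List.flatMap_def]
  | succ f ih =>
    subst h
    rw [generateNumsFuel]
    have hne : (((f + 1 : Nat) : Int) == 0) = false := by simp; omega
    rw [hne]
    simp only [Bool.false_eq_true, if_false, generateNumsIter]
    rw [expand_loop_eq]
    exact ih _ _ (by push_cast; ring)

theorem generateNums_spec : Claim_equal_generateNums := by
  intro n cl _ hpre
  unfold Pre_generateNums at hpre
  unfold Spec_generateNums generateNums generateNums_alt
  exact fuel_eq_iter n.toNat n cl (by omega)
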